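-- pv_equiv track=rewrite | github.com/rlhjansen/Paper_netlists | plot_order.py | paths_to_plotlines
-- ===== SOURCE A (Python) =====
-- def paths_to_plotlines(paths):
--     """ transforms paths format from the grid to a series of plottable points
--
--     :param paths: list of tuples of tuples
--         each outer tuple represents a path for how a certain net is laid
--         each inner tuple represents a specific (x,y,z) location on the circuit
--     :return xpp, ypp, zpp: multiple list of lists where the inner list is a
--         series of points to be plotted for a single netlist (on x,y,z axis
--         respectively)
--     """
--     xpp = []
--     ypp = []
--     zpp = []
--
--     for path in paths:
--         pxs = [spot[0] for spot in path]
--         pys = [spot[1] for spot in path]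
--         pzs = [spot[2] for spot in path]
--
--         xpp.append(pxs)
--         ypp.append(pys)
--         zpp.append(pzs)
--     return xpp, ypp, zpp
-- ===== SOURCE B (Python) =====
-- def paths_to_plotlines(paths):
--     def axis(k):
--         out = []
--         for path in paths:
--             col = []
--             for spot in path:
--                 col.append(spot[k])
--             out.append(col)
--         return out
--     return axis(0), axis(1), axis(2)
-- ===== Notes on version B (the rewrite author's own statement) =====
-- stated objective: alternative
-- what changed: Instead of one loop over paths maintaining three parallel accumulators, B makes three separate staged passes over the whole input, one per axis, each extracting a single coordinate with an accumulator loop.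
import Mathlib
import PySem

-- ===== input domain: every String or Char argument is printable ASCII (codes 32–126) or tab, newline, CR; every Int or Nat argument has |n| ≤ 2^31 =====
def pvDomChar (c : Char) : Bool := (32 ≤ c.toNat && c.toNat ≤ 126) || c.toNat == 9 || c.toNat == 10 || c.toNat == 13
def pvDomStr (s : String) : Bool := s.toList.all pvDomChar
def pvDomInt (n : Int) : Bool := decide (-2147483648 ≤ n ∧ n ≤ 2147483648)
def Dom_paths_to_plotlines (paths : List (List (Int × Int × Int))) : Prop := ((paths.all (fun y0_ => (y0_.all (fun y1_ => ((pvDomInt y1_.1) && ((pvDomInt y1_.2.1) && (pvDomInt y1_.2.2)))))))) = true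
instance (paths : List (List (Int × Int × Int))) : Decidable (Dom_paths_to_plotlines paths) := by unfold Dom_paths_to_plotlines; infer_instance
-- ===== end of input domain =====

-- B replaces A's single loop with three parallel accumulators by three staged
-- per-axis passes over the whole input (objective: alternative decomposition).


-- ===== PORT A =====
-- Port of A: one loop over paths, three index comprehensions per path, appended
-- to the three parallel accumulators.
def paths_to_plotlines (paths : List (List (Int × Int × Int))) : List (List Int) × List (List Int) × List (List Int) :=
  paths.foldl (fun (acc : List (List Int) × List (List Int) × List (List Int)) path =>
      let pxs := path.map (fun spot => spot.1)
      let pys := path.map (fun spot => spot.2.1)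
      let pzs := path.map (fun spot => spot.2.2)
      (acc.1 ++ [pxs], acc.2.1 ++ [pys], acc.2.2 ++ [pzs])) ([], [], [])

-- ===== PORT B =====
-- Port of Source B's helper axis(k): a full pass over paths collecting coordinate k
-- of every spot with accumulator loops; spot[k] is ported as the projection proj.
def pvAxis (paths : List (List (Int × Int × Int))) (proj : Int × Int × Int → Int) : List (List Int) :=
  paths.foldl (fun out path =>
      out ++ [path.foldl (fun col spot => col ++ [proj spot]) []]) []

-- Port of B: three staged passes, one per axis.
def paths_to_plotlines_alt (paths : List (List (Int × Int × Int))) : List (List Int) × List (List Int) × List (List Int) :=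
  (pvAxis paths (fun s => s.1), pvAxis paths (fun s => s.2.1), pvAxis paths (fun s => s.2.2))

-- ===== PRECONDITION & SPEC =====
def Spec_paths_to_plotlines (paths : List (List (Int × Int × Int))) (out : List (List Int) × List (List Int) × List (List Int)) : Prop := out = paths_to_plotlines_alt paths
instance (paths : List (List (Int × Int × Int))) (out : List (List Int) × List (List Int) × List (List Int)) : Decidable (Spec_paths_to_plotlines paths out) := by unfold Spec_paths_to_plotlines; infer_instance

-- ===== CLAIM (what is proved, stated in full; the proofs are below) =====
def Claim_equal_paths_to_plotlines : Prop := ∀ (paths : List (List (Int × Int × Int))), Dom_paths_to_plotlines paths → Spec_paths_to_plotlines paths (paths_to_plotlines paths)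

-- ===== LEMMAS AND PROOFS =====
lemma pv_inner_fold (proj : Int × Int × Int → Int) (path : List (Int × Int × Int)) (acc : List Int) :
    path.foldl (fun col spot => col ++ [proj spot]) acc = acc ++ path.map proj := by
  induction path generalizing acc with
  | nil => simp
  | cons h t ih => simp [List.foldl_cons, ih]

lemma pvAxis_eq_map (paths : List (List (Int × Int × Int))) (proj : Int × Int × Int → Int) :
    pvAxis paths proj = paths.map (fun p => p.map proj) := by
  unfold pvAxis
  suffices h : ∀ acc : List (List Int),
      paths.foldl (fun out path => out ++ [path.foldl (fun col spot => col ++ [proj spot]) []]) acc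
        = acc ++ paths.map (fun p => p.map proj) by simpa using h []
  induction paths with
  | nil => simp
  | cons p t ih => intro acc; rw [List.foldl_cons, pv_inner_fold, ih]; simp

lemma pvA_eq_maps (paths : List (List (Int × Int × Int))) :
    paths_to_plotlines paths =
      (paths.map (fun p => p.map (fun s => s.1)),
       paths.map (fun p => p.map (fun s => s.2.1)),
       paths.map (fun p => p.map (fun s => s.2.2))) := by
  unfold paths_to_plotlines
  suffices h : ∀ acc : List (List Int) × List (List Int) × List (List Int),
      paths.foldl (fun acc path =>
        (acc.1 ++ [path.map (fun s => s.1)], acc.2.1 ++ [path.map (fun s => s.2.1)],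
          acc.2.2 ++ [path.map (fun s => s.2.2)])) acc
        = (acc.1 ++ paths.map (fun p => p.map (fun s => s.1)),
           acc.2.1 ++ paths.map (fun p => p.map (fun s => s.2.1)),
           acc.2.2 ++ paths.map (fun p => p.map (fun s => s.2.2))) by
    simpa using h ([], [], [])
  induction paths with
  | nil => simp
  | cons p t ih => intro acc; simp [List.foldl_cons, ih]

-- ===== VERDICT (by name: the statement is the Claim_ definition above) =====
theorem paths_to_plotlines_spec : Claim_equal_paths_to_plotlines := by
  intro paths _
  show paths_to_plotlines paths = paths_to_plotlines_alt paths
  rw [pvA_eq_maps]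
  unfold paths_to_plotlines_alt
  rw [pvAxis_eq_map, pvAxis_eq_map, pvAxis_eq_map]
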